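-- pv_equiv track=rewrite | github.com/kriskumar/robothack | chess_board_analyzer.py | piece_at_position
-- ===== SOURCE A (Python) =====
-- def piece_at_position(rank_str: str, file_index: int) -> str:
--     """
--     Get the piece at a specific file in a rank string
--     Returns the piece character or None if empty
--     """
--     current_file = 0
--
--     for char in rank_str:
--         if char.isdigit():
--             # Empty squares
--             empty_count = int(char)
--             if current_file <= file_index < current_file + empty_count:
--                 return None  # Empty square
--             current_file += empty_count
--         else:
--             # Piece
--             if current_file == file_index:
--                 return char
--             current_file += 1
--
--     return None
-- ===== SOURCE B (Python) =====
-- def piece_at_position(rank_str: str, file_index: int) -> str: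
--     """
--     Get the piece at a specific file in a rank string
--     Returns the piece character or None if empty
--     """
--     squares = [sq for char in rank_str
--                for sq in ([None] * int(char) if char.isdigit() else [char])]
--     return squares[file_index] if 0 <= file_index < len(squares) else None
-- ===== Notes on version B (the rewrite author's own statement) =====
-- stated objective: simpler
-- what changed: B expands the FEN rank into the full list of squares (digits become that many None entries) and returns a single bounds-guarded positional lookup, replacing A's running file counter with in-loop range tests and early returns.
import Mathlib
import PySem

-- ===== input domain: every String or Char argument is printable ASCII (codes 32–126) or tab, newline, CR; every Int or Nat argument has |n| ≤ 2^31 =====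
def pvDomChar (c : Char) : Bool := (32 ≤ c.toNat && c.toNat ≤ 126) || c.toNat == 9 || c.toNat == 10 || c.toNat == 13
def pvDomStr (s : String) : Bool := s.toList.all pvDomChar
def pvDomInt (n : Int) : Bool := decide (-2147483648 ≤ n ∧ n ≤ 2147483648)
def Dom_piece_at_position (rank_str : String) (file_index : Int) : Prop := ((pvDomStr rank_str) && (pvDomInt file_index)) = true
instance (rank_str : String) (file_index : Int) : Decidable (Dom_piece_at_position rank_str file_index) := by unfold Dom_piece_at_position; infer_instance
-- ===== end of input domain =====

-- B builds the expanded list of rank squares once and looks the file up positionally,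
-- instead of A's running file counter with early returns (objective: simpler).

-- ===== PORT A =====
-- the for-loop over rank_str with state current_file; int(char) for a single digit char
-- is exactly (char.toNat - 48) (exact because the branch is guarded by isdigit)
def pieceLoopA : List Char → Int → Int → Option String
  | [], _, _ => none
  | c :: rest, current_file, file_index =>
    if PySem.Chars.isdigit c then
      let empty_count : Int := ((c.toNat - 48 : Nat) : Int)
      if current_file ≤ file_index ∧ file_index < current_file + empty_count then
        none
      else
        pieceLoopA rest (current_file + empty_count) file_index
    else
      if current_file == file_index then
        some (String.mk [c])
      else
        pieceLoopA rest (current_file + 1) file_index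

def piece_at_position (rank_str : String) (file_index : Int) : Option String :=
  pieceLoopA rank_str.toList 0 file_index

-- ===== PORT B =====
-- the comprehension: each digit char contributes int(char) copies of None, any other char itself
def expandRank : List Char → List (Option String)
  | [] => []
  | c :: rest =>
    (if PySem.Chars.isdigit c then List.replicate (c.toNat - 48) none
     else [some (String.mk [c])]) ++ expandRank rest

def piece_at_position_alt (rank_str : String) (file_index : Int) : Option String :=
  let squares := expandRank rank_str.toList
  if 0 ≤ file_index ∧ file_index < (squares.length : Int) then
    squares.getD file_index.toNat none   -- squares[file_index], in range by the guard
  else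
    none

-- ===== PRECONDITION & SPEC =====
def Spec_piece_at_position (rank_str : String) (file_index : Int) (out : Option String) : Prop := out = piece_at_position_alt rank_str file_index
instance (rank_str : String) (file_index : Int) (out : Option String) : Decidable (Spec_piece_at_position rank_str file_index out) := by unfold Spec_piece_at_position; infer_instance

-- ===== CLAIM (what is proved, stated in full; the proofs are below) =====
def Claim_equal_piece_at_position : Prop := ∀ (rank_str : String) (file_index : Int), Dom_piece_at_position rank_str file_index → Spec_piece_at_position rank_str file_index (piece_at_position rank_str file_index)

-- ===== LEMMAS AND PROOFS =====
def idxOpt (l : List (Option String)) (i : Int) : Option String :=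
  if 0 ≤ i ∧ i < (l.length : Int) then l.getD i.toNat none else none

theorem pieceLoopA_eq_idx (chars : List Char) :
    ∀ (cf fi : Int), pieceLoopA chars cf fi = idxOpt (expandRank chars) (fi - cf) := by
  induction chars with
  | nil =>
    intro cf fi
    simp only [pieceLoopA, expandRank, idxOpt, List.length_nil]
    split_ifs with h
    · omega
    · rfl
  | cons c rest ih =>
    intro cf fi
    rw [pieceLoopA]
    by_cases hd : PySem.Chars.isdigit c = true
    · -- digit: one block of n empty squares
      set n : Nat := c.toNat - 48 with hn
      have hexp : expandRank (c :: rest)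
          = List.replicate n (none : Option String) ++ expandRank rest := by
        simp [expandRank, hd, ← hn]
      rw [hexp]
      simp only [hd, if_true]
      split_ifs with hin
      · -- inside the block: both sides are none
        have hlt : (fi - cf).toNat < n := by omega
        unfold idxOpt
        split_ifs with hb
        · rw [List.getD_eq_getElem?_getD, List.getElem?_append_left (by simpa using hlt)]
          simp [hlt]
        · rfl
      · rw [ih]
        unfold idxOpt
        simp only [List.length_append, List.length_replicate]
        split_ifs with h1 h2 h2
        · -- both in range of the tail
          rw [List.getD_eq_getElem?_getD, List.getD_eq_getElem?_getD,
            List.getElem?_append_right (by simp; omega)]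
          have : (fi - cf).toNat - (List.replicate n (none : Option String)).length
              = (fi - (cf + (n : Int))).toNat := by simp; omega
          rw [this]
        · omega
        · omega
        · rfl
    · -- a piece character
      have hexp : expandRank (c :: rest)
          = some (String.mk [c]) :: expandRank rest := by
        simp [expandRank, hd]
      rw [hexp]
      simp only [hd, Bool.false_eq_true, if_false]
      by_cases heq : cf = fi
      · have : (cf == fi) = true := by simp [heq]
        rw [this]
        simp only [if_true]
        unfold idxOpt
        have h0 : fi - cf = 0 := by omega
        rw [h0]
        split_ifs with hb
        · rfl
        · simp at hb
      · have : (cf == fi) = false := by simp [heq]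
        rw [this]
        simp only [Bool.false_eq_true, if_false]
        rw [ih]
        unfold idxOpt
        simp only [List.length_cons]
        split_ifs with h1 h2 h2
        · rw [List.getD_eq_getElem?_getD, List.getD_eq_getElem?_getD]
          have hk : (fi - cf).toNat = ((fi - (cf + 1)).toNat) + 1 := by omega
          rw [hk, List.getElem?_cons_succ]
        · omega
        · omega
        · rfl

-- ===== VERDICT (by name: the statement is the Claim_ definition above) =====
theorem piece_at_position_spec : Claim_equal_piece_at_position := by
  intro rank_str file_index _
  unfold Spec_piece_at_position piece_at_position piece_at_position_alt
  rw [pieceLoopA_eq_idx]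
  unfold idxOpt
  simp
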